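-- pv_equiv track=rewrite | github.com/priyaranjankumar/code_analyser | visualization/architecture.py | _get_complexity_distribution
-- ===== SOURCE A (Python) =====
-- from typing import Dict, List, Any, Optional
--
-- def _get_complexity_distribution(complexity_dict: Dict[str, int]) -> Dict[str, int]:
--     """Get distribution of complexity levels"""
--     distribution = {'low': 0, 'medium': 0, 'high': 0, 'very_high': 0}
--
--     for complexity in complexity_dict.values():
--         if complexity <= 5:
--             distribution['low'] += 1
--         elif complexity <= 10:
--             distribution['medium'] += 1
--         elif complexity <= 20:
--             distribution['high'] += 1
--         else:
--             distribution['very_high'] += 1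
--
--     return distribution
-- ===== SOURCE B (Python) =====
-- def _get_complexity_distribution(complexity_dict):
--     """Get distribution of complexity levels via cumulative threshold counts."""
--     vals = list(complexity_dict.values())
--     c5 = sum(1 for v in vals if v <= 5)
--     c10 = sum(1 for v in vals if v <= 10)
--     c20 = sum(1 for v in vals if v <= 20)
--     return {'low': c5, 'medium': c10 - c5, 'high': c20 - c10, 'very_high': len(vals) - c20}
-- ===== Notes on version B (the rewrite author's own statement) =====
-- stated objective: alternative
-- what changed: Replaces the per-element if/elif cascade updating a mutable counter dict by three cumulative threshold counts (count of values <= 5, <= 10, <= 20) whose differences give the four buckets, built into the result dict at the end.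
import Mathlib
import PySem

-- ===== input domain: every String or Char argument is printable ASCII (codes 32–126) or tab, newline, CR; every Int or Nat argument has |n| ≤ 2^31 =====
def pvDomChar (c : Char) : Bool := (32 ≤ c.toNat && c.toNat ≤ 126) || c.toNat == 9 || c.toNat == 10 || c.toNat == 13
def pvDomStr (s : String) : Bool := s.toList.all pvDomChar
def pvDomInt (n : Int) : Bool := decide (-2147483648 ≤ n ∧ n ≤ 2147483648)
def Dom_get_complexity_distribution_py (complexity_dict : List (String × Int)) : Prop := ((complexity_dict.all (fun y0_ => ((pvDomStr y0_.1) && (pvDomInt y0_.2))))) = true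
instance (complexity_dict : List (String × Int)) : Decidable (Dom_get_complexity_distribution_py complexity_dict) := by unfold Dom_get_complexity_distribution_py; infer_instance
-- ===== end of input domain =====

-- B replaces A's per-element if/elif counter-dict update by three cumulative threshold
-- counts whose differences give the four buckets (alternative decomposition, same O(n) cost).
-- ===== PORT A =====
-- Literal port of A: a counter dict pre-seeded with the four levels, updated by an if/elif cascade.
def get_complexity_distribution_py (complexity_dict : List (String × Int)) : List (String × Int) :=
  let distribution : PySem.Dict String Int :=
    PySem.Dict.ofList [("low", 0), ("medium", 0), ("high", 0), ("very_high", 0)]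
  let distribution :=
    (complexity_dict.map (·.2)).foldl (fun d complexity =>
      if complexity ≤ 5 then d.insert "low" (d.getD "low" 0 + 1)
      else if complexity ≤ 10 then d.insert "medium" (d.getD "medium" 0 + 1)
      else if complexity ≤ 20 then d.insert "high" (d.getD "high" 0 + 1)
      else d.insert "very_high" (d.getD "very_high" 0 + 1)) distribution
  distribution.items

-- ===== PORT B =====
-- Port of B: three cumulative threshold counts; bucket sizes are their differences.
def get_complexity_distribution_py_alt (complexity_dict : List (String × Int)) : List (String × Int) :=
  let vals := complexity_dict.map (·.2)
  let c5 : Int := vals.countP (fun v => v ≤ 5)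
  let c10 : Int := vals.countP (fun v => v ≤ 10)
  let c20 : Int := vals.countP (fun v => v ≤ 20)
  [("low", c5), ("medium", c10 - c5), ("high", c20 - c10), ("very_high", (vals.length : Int) - c20)]

-- ===== PRECONDITION & SPEC =====
def Spec_get_complexity_distribution_py (complexity_dict : List (String × Int)) (out : List (String × Int)) : Prop := out = get_complexity_distribution_py_alt complexity_dict
instance (complexity_dict : List (String × Int)) (out : List (String × Int)) : Decidable (Spec_get_complexity_distribution_py complexity_dict out) := by unfold Spec_get_complexity_distribution_py; infer_instance

-- ===== CLAIM (what is proved, stated in full; the proofs are below) =====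
def Claim_equal_get_complexity_distribution_py : Prop := ∀ (complexity_dict : List (String × Int)), Dom_get_complexity_distribution_py complexity_dict → Spec_get_complexity_distribution_py complexity_dict (get_complexity_distribution_py complexity_dict)

-- ===== LEMMAS AND PROOFS =====

lemma fold_eval (vs : List Int) (a b c d : Int) :
    vs.foldl (fun d complexity =>
      if complexity ≤ 5 then d.insert "low" (d.getD "low" 0 + 1)
      else if complexity ≤ 10 then d.insert "medium" (d.getD "medium" 0 + 1)
      else if complexity ≤ 20 then d.insert "high" (d.getD "high" 0 + 1)
      else d.insert "very_high" (d.getD "very_high" 0 + 1))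
      (PySem.Dict.mk [("low", a), ("medium", b), ("high", c), ("very_high", d)])
    = PySem.Dict.mk [("low", a + (vs.countP (fun v => v ≤ 5) : Int)),
        ("medium", b + ((vs.countP (fun v => v ≤ 10) : Int) - (vs.countP (fun v => v ≤ 5) : Int))),
        ("high", c + ((vs.countP (fun v => v ≤ 20) : Int) - (vs.countP (fun v => v ≤ 10) : Int))),
        ("very_high", d + ((vs.length : Int) - (vs.countP (fun v => v ≤ 20) : Int)))] := by
  induction vs generalizing a b c d with
  | nil => simp
  | cons v vs ih =>
    simp only [List.foldl_cons, List.countP_cons, List.length_cons]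
    by_cases h5 : v ≤ 5
    · have h10 : v ≤ 10 := by omega
      have h20 : v ≤ 20 := by omega
      simp only [if_pos h5]
      rw [show (PySem.Dict.mk [("low", a), ("medium", b), ("high", c), ("very_high", d)]).insert
          "low" ((PySem.Dict.mk [("low", a), ("medium", b), ("high", c), ("very_high", d)]).getD "low" 0 + 1)
          = PySem.Dict.mk [("low", a + 1), ("medium", b), ("high", c), ("very_high", d)] from by rfl, ih]
      simp only [h5, h10, h20, decide_true]
      push_cast
      refine congrArg _ ?_
      norm_num; omega
    · by_cases h10 : v ≤ 10
      · have h20 : v ≤ 20 := by omega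
        simp only [if_neg h5, if_pos h10]
        rw [show (PySem.Dict.mk [("low", a), ("medium", b), ("high", c), ("very_high", d)]).insert
            "medium" ((PySem.Dict.mk [("low", a), ("medium", b), ("high", c), ("very_high", d)]).getD "medium" 0 + 1)
            = PySem.Dict.mk [("low", a), ("medium", b + 1), ("high", c), ("very_high", d)] from by rfl, ih]
        simp only [h5, h10, h20, decide_true, decide_false]
        push_cast
        refine congrArg _ ?_
        norm_num; omega
      · by_cases h20 : v ≤ 20
        · simp only [if_neg h5, if_neg h10, if_pos h20]
          rw [show (PySem.Dict.mk [("low", a), ("medium", b), ("high", c), ("very_high", d)]).insert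
              "high" ((PySem.Dict.mk [("low", a), ("medium", b), ("high", c), ("very_high", d)]).getD "high" 0 + 1)
              = PySem.Dict.mk [("low", a), ("medium", b), ("high", c + 1), ("very_high", d)] from by rfl, ih]
          simp only [h5, h10, h20, decide_true, decide_false]
          push_cast
          refine congrArg _ ?_
          norm_num; omega
        · simp only [if_neg h5, if_neg h10, if_neg h20]
          rw [show (PySem.Dict.mk [("low", a), ("medium", b), ("high", c), ("very_high", d)]).insert
              "very_high" ((PySem.Dict.mk [("low", a), ("medium", b), ("high", c), ("very_high", d)]).getD "very_high" 0 + 1)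
              = PySem.Dict.mk [("low", a), ("medium", b), ("high", c), ("very_high", d + 1)] from by rfl, ih]
          simp only [h5, h10, h20, decide_false]
          push_cast
          refine congrArg _ ?_
          norm_num; omega

-- ===== VERDICT (by name: the statement is the Claim_ definition above) =====
theorem get_complexity_distribution_py_spec : Claim_equal_get_complexity_distribution_py := by
  intro cd _
  show get_complexity_distribution_py cd = get_complexity_distribution_py_alt cd
  unfold get_complexity_distribution_py get_complexity_distribution_py_alt
  dsimp only
  rw [show PySem.Dict.ofList [("low", (0:Int)), ("medium", 0), ("high", 0), ("very_high", 0)]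
      = PySem.Dict.mk [("low", 0), ("medium", 0), ("high", 0), ("very_high", 0)] from by rfl]
  rw [fold_eval]
  simp [PySem.Dict.items]
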